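-- pv_equiv track=rewrite | github.com/CypriumCuprum/AI_Contest_2023 | Final_4/traintrain/traintraintrain.py | get_possible_move_lists
-- ===== SOURCE A (Python) =====
-- from copy import deepcopy
--
-- def get_a_possible_move_list(right=0, left=0, rot_right=0, rot_left=0):
--     a_possible_move_list = []
--     for _ in range(rot_left):
--         a_possible_move_list.append(4)
--     for _ in range(rot_right):
--         a_possible_move_list.append(3)
--     for _ in range(right):
--         a_possible_move_list.append(5)
--     for _ in range(left):
--         a_possible_move_list.append(6)
--     a_possible_move_list.append(2)
--     return a_possible_move_list
--
-- def get_possible_move_lists(possible_move_lists, nowblock):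
--     max_left = 4
--     max_right = 3
--     """extra"""
--     newpossible_movelists = []
--     for item in possible_move_lists:
--         new_item = deepcopy(item)
--         if nowblock == 1:
--             """ no rotate"""
--             max_left = 4
--             max_right = 2
--             for left in range(0, max_left + 1):
--                 newpossible_movelists.append(new_item + get_a_possible_move_list(left=left))
--             for right in range(1, max_right + 1):
--                 newpossible_movelists.append(new_item + get_a_possible_move_list(right=right))
--             """rotate right: 1"""
--             max_left = 6
--             max_right = 3
--             for left in range(0, max_left + 1):
--                 newpossible_movelists.append(new_item + get_a_possible_move_list(left=left, rot_right=1))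
--             for right in range(1, max_right + 1):
--                 newpossible_movelists.append(new_item + get_a_possible_move_list(right=right, rot_right=1))
--         elif nowblock == 2:
--             max_left = 5
--             max_right = 3
--             for left in range(0, max_left + 1):
--                 newpossible_movelists.append(new_item + get_a_possible_move_list(left=left))
--             for right in range(1, max_right + 1):
--                 newpossible_movelists.append(new_item + get_a_possible_move_list(right=right))
--         elif nowblock == 3 or nowblock == 4 or nowblock == 7:
--             """no rotate"""
--             max_left = 4
--             max_right = 3
--             for left in range(0, max_left + 1):
--                 newpossible_movelists.append(new_item + get_a_possible_move_list(left=left))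
--             for right in range(1, max_right + 1):
--                 newpossible_movelists.append(new_item + get_a_possible_move_list(right=right))
--             """rotate left = 2"""
--             max_left = 4
--             max_right = 3
--             for left in range(0, max_left + 1):
--                 newpossible_movelists.append(new_item + get_a_possible_move_list(left=left, rot_left=2))
--             for right in range(1, max_right + 1):
--                 newpossible_movelists.append(new_item + get_a_possible_move_list(right=right, rot_left=2))
--             """ rotate left 1"""
--             max_left = 4
--             max_right = 4
--             for left in range(0, max_left + 1):
--                 newpossible_movelists.append(new_item + get_a_possible_move_list(left=left, rot_left=1))
--             for right in range(1, max_right + 1):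
--                 newpossible_movelists.append(new_item + get_a_possible_move_list(right=right, rot_left=1))
--             """rotate right"""
--             max_left = 5
--             max_right = 3
--             for left in range(0, max_left + 1):
--                 newpossible_movelists.append(new_item + get_a_possible_move_list(left=left, rot_right=1))
--             for right in range(1, max_right + 1):
--                 newpossible_movelists.append(new_item + get_a_possible_move_list(right=right, rot_right=1))
--         elif nowblock == 5 or nowblock == 6:
--             """no rotate"""
--             max_left = 4
--             max_right = 3
--             for left in range(0, max_left + 1):
--                 newpossible_movelists.append(new_item + get_a_possible_move_list(left=left))
--             for right in range(1, max_right + 1):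
--                 newpossible_movelists.append(new_item + get_a_possible_move_list(right=right))
--             """rotate_right"""
--             max_left = 5
--             max_right = 3
--             for left in range(0, max_left + 1):
--                 newpossible_movelists.append(new_item + get_a_possible_move_list(left=left, rot_right=1))
--             for right in range(1, max_right + 1):
--                 newpossible_movelists.append(new_item + get_a_possible_move_list(right=right, rot_right=1))
--             """rotate left"""
--             max_left = 4
--             max_right = 4
--             for left in range(0, max_left + 1):
--                 newpossible_movelists.append(new_item + get_a_possible_move_list(left=left, rot_left=1))
--             for right in range(1, max_right + 1):
--                 newpossible_movelists.append(new_item + get_a_possible_move_list(right=right, rot_left=1))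
--     return newpossible_movelists
-- ===== SOURCE B (Python) =====
-- # Per-block phase parameters: (rot_left, rot_right, max_left, max_right), in A's order.
-- _PHASES = {
--     1: [(0, 0, 4, 2), (0, 1, 6, 3)],
--     2: [(0, 0, 5, 3)],
--     3: [(0, 0, 4, 3), (2, 0, 4, 3), (1, 0, 4, 4), (0, 1, 5, 3)],
--     4: [(0, 0, 4, 3), (2, 0, 4, 3), (1, 0, 4, 4), (0, 1, 5, 3)],
--     7: [(0, 0, 4, 3), (2, 0, 4, 3), (1, 0, 4, 4), (0, 1, 5, 3)],
--     5: [(0, 0, 4, 3), (0, 1, 5, 3), (1, 0, 4, 4)],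
--     6: [(0, 0, 4, 3), (0, 1, 5, 3), (1, 0, 4, 4)],
-- }
--
--
-- def _suffixes(nowblock):
--     """All appended move-list suffixes for this block, built once, incrementally:
--     each next suffix extends the running core by one move instead of being
--     rebuilt from scratch."""
--     sufs = []
--     for rot_left, rot_right, max_left, max_right in _PHASES.get(nowblock, []):
--         prefix = [4] * rot_left + [3] * rot_right
--         core = list(prefix)
--         sufs.append(core + [2])
--         for _ in range(max_left):
--             core.append(6)
--             sufs.append(core + [2])
--         core = list(prefix)
--         for _ in range(max_right):
--             core.append(5)
--             sufs.append(core + [2])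
--     return sufs
--
--
-- def get_possible_move_lists(possible_move_lists, nowblock):
--     sufs = _suffixes(nowblock)
--     return [item + s for item in possible_move_lists for s in sufs]
-- ===== Notes on version B (the rewrite author's own statement) =====
-- stated objective: alternative
-- what changed: Instead of A's four copy-pasted branch bodies that rebuild every suffix from scratch inside the per-item loop via the replicate-based helper, B computes the block's suffix list once per call - growing each suffix incrementally from a running core - and then emits the output as a single item x suffix cross product.
import Mathlib
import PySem

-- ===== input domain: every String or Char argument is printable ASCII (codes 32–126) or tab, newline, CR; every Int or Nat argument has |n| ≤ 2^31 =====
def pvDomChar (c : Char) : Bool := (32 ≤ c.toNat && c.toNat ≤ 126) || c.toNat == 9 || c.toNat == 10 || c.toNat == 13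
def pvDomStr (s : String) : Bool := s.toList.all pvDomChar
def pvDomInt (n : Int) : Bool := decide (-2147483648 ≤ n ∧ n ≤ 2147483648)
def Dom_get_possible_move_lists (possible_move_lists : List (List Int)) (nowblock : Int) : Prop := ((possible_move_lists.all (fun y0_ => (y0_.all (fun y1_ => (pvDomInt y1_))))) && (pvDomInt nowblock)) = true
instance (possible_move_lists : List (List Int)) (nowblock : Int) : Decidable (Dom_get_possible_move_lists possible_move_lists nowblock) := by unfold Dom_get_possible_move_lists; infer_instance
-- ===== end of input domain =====

-- B builds the block's suffix move-lists ONCE per call (incrementally, from a running core)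
-- and emits the output as one item × suffix cross product, instead of A's four copy-pasted
-- branch bodies regenerating every suffix from scratch inside the per-item loop (objective: alternative).

-- ===== PORT A =====
-- shared same-module helper get_a_possible_move_list (each 'for _ in range(n): append(v)' = replicate)
def get_a_possible_move_list (right left rot_right rot_left : Int) : List Int :=
  List.replicate rot_left.toNat 4 ++ List.replicate rot_right.toNat 3 ++
  List.replicate right.toNat 5 ++ List.replicate left.toNat 6 ++ [2]

-- per-item contribution of A's loop body (the branch chain, loops as maps over pyRange)
def pvA_block (nowblock : Int) (new_item : List Int) : List (List Int) :=
  if nowblock = 1 then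
    (PySem.List.pyRange 0 (4+1) 1).map (fun left => new_item ++ get_a_possible_move_list 0 left 0 0) ++
    (PySem.List.pyRange 1 (2+1) 1).map (fun right => new_item ++ get_a_possible_move_list right 0 0 0) ++
    (PySem.List.pyRange 0 (6+1) 1).map (fun left => new_item ++ get_a_possible_move_list 0 left 1 0) ++
    (PySem.List.pyRange 1 (3+1) 1).map (fun right => new_item ++ get_a_possible_move_list right 0 1 0)
  else if nowblock = 2 then
    (PySem.List.pyRange 0 (5+1) 1).map (fun left => new_item ++ get_a_possible_move_list 0 left 0 0) ++
    (PySem.List.pyRange 1 (3+1) 1).map (fun right => new_item ++ get_a_possible_move_list right 0 0 0)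
  else if nowblock = 3 ∨ nowblock = 4 ∨ nowblock = 7 then
    (PySem.List.pyRange 0 (4+1) 1).map (fun left => new_item ++ get_a_possible_move_list 0 left 0 0) ++
    (PySem.List.pyRange 1 (3+1) 1).map (fun right => new_item ++ get_a_possible_move_list right 0 0 0) ++
    (PySem.List.pyRange 0 (4+1) 1).map (fun left => new_item ++ get_a_possible_move_list 0 left 0 2) ++
    (PySem.List.pyRange 1 (3+1) 1).map (fun right => new_item ++ get_a_possible_move_list right 0 0 2) ++
    (PySem.List.pyRange 0 (4+1) 1).map (fun left => new_item ++ get_a_possible_move_list 0 left 0 1) ++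
    (PySem.List.pyRange 1 (4+1) 1).map (fun right => new_item ++ get_a_possible_move_list right 0 0 1) ++
    (PySem.List.pyRange 0 (5+1) 1).map (fun left => new_item ++ get_a_possible_move_list 0 left 1 0) ++
    (PySem.List.pyRange 1 (3+1) 1).map (fun right => new_item ++ get_a_possible_move_list right 0 1 0)
  else if nowblock = 5 ∨ nowblock = 6 then
    (PySem.List.pyRange 0 (4+1) 1).map (fun left => new_item ++ get_a_possible_move_list 0 left 0 0) ++
    (PySem.List.pyRange 1 (3+1) 1).map (fun right => new_item ++ get_a_possible_move_list right 0 0 0) ++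
    (PySem.List.pyRange 0 (5+1) 1).map (fun left => new_item ++ get_a_possible_move_list 0 left 1 0) ++
    (PySem.List.pyRange 1 (3+1) 1).map (fun right => new_item ++ get_a_possible_move_list right 0 1 0) ++
    (PySem.List.pyRange 0 (4+1) 1).map (fun left => new_item ++ get_a_possible_move_list 0 left 0 1) ++
    (PySem.List.pyRange 1 (4+1) 1).map (fun right => new_item ++ get_a_possible_move_list right 0 0 1)
  else []

def get_possible_move_lists (possible_move_lists : List (List Int)) (nowblock : Int) : List (List Int) :=
  possible_move_lists.foldl (fun newpossible_movelists new_item =>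
    newpossible_movelists ++ pvA_block nowblock new_item) []

-- ===== PORT B =====
-- the _PHASES dict of Source B: block id ↦ ordered (rot_left, rot_right, max_left, max_right) phases
def pvPhases : PySem.Dict Int (List (Int × Int × Int × Int)) :=
  (((((((PySem.Dict.empty.insert 1 [(0, 0, 4, 2), (0, 1, 6, 3)]).insert
    2 [(0, 0, 5, 3)]).insert
    3 [(0, 0, 4, 3), (2, 0, 4, 3), (1, 0, 4, 4), (0, 1, 5, 3)]).insert
    4 [(0, 0, 4, 3), (2, 0, 4, 3), (1, 0, 4, 4), (0, 1, 5, 3)]).insert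
    7 [(0, 0, 4, 3), (2, 0, 4, 3), (1, 0, 4, 4), (0, 1, 5, 3)]).insert
    5 [(0, 0, 4, 3), (0, 1, 5, 3), (1, 0, 4, 4)]).insert
    6 [(0, 0, 4, 3), (0, 1, 5, 3), (1, 0, 4, 4)])

-- one phase's suffixes of _suffixes (Source B): state = (core, sufs), each loop step extends core
def pvPhaseSufs (p : Int × Int × Int × Int) (sufs : List (List Int)) : List (List Int) :=
  let pref := List.replicate p.1.toNat 4 ++ List.replicate p.2.1.toNat 3
  let s1 := (PySem.List.pyRange 0 p.2.2.1 1).foldl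
      (fun (st : List Int × List (List Int)) _ =>
        let core := st.1 ++ [6]; (core, st.2 ++ [core ++ [2]]))
      (pref, sufs ++ [pref ++ [2]])
  let s2 := (PySem.List.pyRange 0 p.2.2.2 1).foldl
      (fun (st : List Int × List (List Int)) _ =>
        let core := st.1 ++ [5]; (core, st.2 ++ [core ++ [2]]))
      (pref, s1.2)
  s2.2

def pvSuffixes (nowblock : Int) : List (List Int) :=
  (pvPhases.getD nowblock []).foldl (fun sufs p => pvPhaseSufs p sufs) []

def get_possible_move_lists_alt (possible_move_lists : List (List Int)) (nowblock : Int) : List (List Int) :=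
  let sufs := pvSuffixes nowblock
  possible_move_lists.flatMap (fun item => sufs.map (fun s => item ++ s))

-- ===== PRECONDITION & SPEC =====
def Spec_get_possible_move_lists (possible_move_lists : List (List Int)) (nowblock : Int) (out : List (List Int)) : Prop := out = get_possible_move_lists_alt possible_move_lists nowblock
instance (possible_move_lists : List (List Int)) (nowblock : Int) (out : List (List Int)) : Decidable (Spec_get_possible_move_lists possible_move_lists nowblock out) := by unfold Spec_get_possible_move_lists; infer_instance

-- ===== CLAIM (what is proved, stated in full; the proofs are below) =====
def Claim_equal_get_possible_move_lists : Prop := ∀ (possible_move_lists : List (List Int)) (nowblock : Int), Dom_get_possible_move_lists possible_move_lists nowblock → Spec_get_possible_move_lists possible_move_lists nowblock (get_possible_move_lists possible_move_lists nowblock)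

-- ===== LEMMAS AND PROOFS =====

-- the per-item contributions agree: A's branch chain = item prepended to B's suffix table
theorem pv_block_eq (nowblock : Int) (item : List Int) :
    pvA_block nowblock item = (pvSuffixes nowblock).map (fun s => item ++ s) := by
  unfold pvA_block pvSuffixes
  split_ifs with h1 h2 h3 h5
  · subst h1; rfl
  · subst h2; rfl
  · rcases h3 with h | h | h <;> subst h <;> rfl
  · rcases h5 with h | h <;> subst h <;> rfl
  · have hc : pvPhases.contains nowblock = false := by
      rw [PySem.Dict.contains_eq_decide_mem_keys]
      have hk : pvPhases.keys = [1, 2, 3, 4, 7, 5, 6] := rfl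
      simp only [not_or] at h3 h5
      rw [hk]
      simp [h1, h2, h3.1, h3.2.1, h3.2.2, h5.1, h5.2]
    rw [PySem.Dict.getD_of_not_contains (h := hc)]
    rfl

-- ===== VERDICT (by name: the statement is the Claim_ definition above) =====
theorem get_possible_move_lists_spec : Claim_equal_get_possible_move_lists := by
  intro pml nb _
  unfold Spec_get_possible_move_lists get_possible_move_lists get_possible_move_lists_alt
  rw [PySem.List.foldl_append_eq_flatMap]
  simp only [List.nil_append]
  exact congrArg (fun f => List.flatMap f pml) (funext (pv_block_eq nb))
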